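-- pv_equiv track=rewrite | github.com/TroadecJb/AlgoInvest-Trade | functions/portfolios.py | createPFfromList
-- ===== SOURCE A (Python) =====
-- import itertools
--
-- def createPFfromList(listActions: list, budget: int) -> list:
--     # returns all combinations of a list which sum are under the budget
--     masterList = list()
--
--     for i in range(1, len(listActions) + 1):
--         combo = list(itertools.combinations(listActions, i))
--
--         masterList += [
--             portefeuille
--             for portefeuille in combo
--             if sum([action[0] for action in portefeuille]) <= budget
--         ]
--
--     return masterList
-- ===== SOURCE B (Python) =====
-- def createPFfromList(listActions: list, budget: int) -> list:
--     # Build, in one right-to-left pass, levels[k] = all size-(k+1) combos (as tuples)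
--     # paired with their price sum, in itertools order; then filter by budget once.
--     levels = []
--     for x in reversed(listActions):
--         p = x[0]
--         n = len(levels)
--         new = []
--         for k in range(n + 1):
--             lower = levels[k - 1] if k > 0 else [((), 0)]
--             extended = [((x,) + c, p + s) for (c, s) in lower]
--             new.append(extended + (levels[k] if k < n else []))
--         levels = new
--     return [c for lvl in levels for (c, s) in lvl if s <= budget]
-- ===== Notes on version B (the rewrite author's own statement) =====
-- stated objective: alternative
-- what changed: Instead of calling itertools.combinations from scratch for every size and re-summing each combination, B builds all combination levels in one right-to-left pass that shares work between sizes and carries each combination's price sum incrementally, then filters once.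
import Mathlib
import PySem

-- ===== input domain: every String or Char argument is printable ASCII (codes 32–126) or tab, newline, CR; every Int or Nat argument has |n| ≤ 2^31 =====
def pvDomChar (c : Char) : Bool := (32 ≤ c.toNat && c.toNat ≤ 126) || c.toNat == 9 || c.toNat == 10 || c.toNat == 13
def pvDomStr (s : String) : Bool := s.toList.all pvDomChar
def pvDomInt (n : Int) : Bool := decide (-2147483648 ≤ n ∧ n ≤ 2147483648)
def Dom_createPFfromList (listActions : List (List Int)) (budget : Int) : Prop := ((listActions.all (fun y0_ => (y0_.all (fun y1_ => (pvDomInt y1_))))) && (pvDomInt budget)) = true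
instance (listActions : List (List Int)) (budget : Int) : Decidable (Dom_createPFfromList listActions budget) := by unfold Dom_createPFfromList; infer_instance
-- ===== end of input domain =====

-- B replaces the per-size itertools.combinations passes by one right-to-left pass that
-- shares structure between sizes and carries each combination's price sum incrementally
-- (objective: alternative, same output). Both programs raise IndexError on an empty
-- inner action (action[0]), so Pre_ requires all actions nonempty.

-- ===== PORT A =====
-- sum([action[0] for action in portefeuille]); pyGetD is exact here since Pre_ makes every action nonempty
def pvSumF (p : List (List Int)) : Int := (p.map (fun a => PySem.List.pyGetD a 0 0)).sum

def createPFfromList (listActions : List (List Int)) (budget : Int) : List (List (List Int)) :=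
  (PySem.List.pyRange 1 (listActions.length + 1) 1).foldl
    (fun masterList i =>
      masterList ++
        (PySem.List.combinations listActions i.toNat).filter
          (fun portefeuille => decide (pvSumF portefeuille ≤ budget)))
    []

-- ===== PORT B =====
-- one loop iteration: from the levels of the tail, the levels of x :: tail
def pvStepB (levels : List (List (List (List Int) × Int))) (x : List Int) :
    List (List (List (List Int) × Int)) :=
  let p := PySem.List.pyGetD x 0 0
  let n := levels.length
  (List.range (n + 1)).map (fun k =>
    let lower := if 0 < k then levels.getD (k - 1) [] else [(([] : List (List Int)), (0 : Int))]
    let extended := lower.map (fun cs => (x :: cs.1, p + cs.2))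
    extended ++ (if k < n then levels.getD k [] else []))

def createPFfromList_alt (listActions : List (List Int)) (budget : Int) : List (List (List Int)) :=
  let levels := listActions.reverse.foldl pvStepB []
  levels.flatMap (fun lvl => (lvl.filter (fun cs => decide (cs.2 ≤ budget))).map (fun cs => cs.1))

-- ===== PRECONDITION & SPEC =====
-- Pre_ excludes exactly the inputs where Python A raises IndexError: some action is the empty list
def Pre_createPFfromList (listActions : List (List Int)) (budget : Int) : Prop :=
  listActions.all (fun a => !a.isEmpty) = true
instance (listActions : List (List Int)) (budget : Int) : Decidable (Pre_createPFfromList listActions budget) := by unfold Pre_createPFfromList; infer_instance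
def pvWitness_createPFfromList : List (List Int) × Int := ([[10, 5], [20, 3], [4, 7]], 25)

def Spec_createPFfromList (listActions : List (List Int)) (budget : Int) (out : List (List (List Int))) : Prop := out = createPFfromList_alt listActions budget
instance (listActions : List (List Int)) (budget : Int) (out : List (List (List Int))) : Decidable (Spec_createPFfromList listActions budget out) := by unfold Spec_createPFfromList; infer_instance

-- ===== CLAIM (what is proved, stated in full; the proofs are below) =====
def Claim_equal_createPFfromList : Prop := ∀ (listActions : List (List Int)) (budget : Int), Dom_createPFfromList listActions budget → Pre_createPFfromList listActions budget → Spec_createPFfromList listActions budget (createPFfromList listActions budget)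

-- ===== LEMMAS AND PROOFS =====

-- the intended value of the levels accumulator after consuming xs
def pvLevels (xs : List (List Int)) : List (List (List (List Int) × Int)) :=
  (List.range xs.length).map (fun k =>
    (PySem.List.combinations xs (k + 1)).map (fun c => (c, pvSumF c)))

lemma pvLevels_length (xs : List (List Int)) : (pvLevels xs).length = xs.length := by
  simp [pvLevels]

lemma pvLevels_getD (xs : List (List Int)) (k : Nat) (h : k < xs.length) :
    (pvLevels xs).getD k [] =
      (PySem.List.combinations xs (k + 1)).map (fun c => (c, pvSumF c)) := by
  simp [pvLevels, List.getD_eq_getElem?_getD, h]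

lemma pvStepB_pvLevels (x : List Int) (xs : List (List Int)) :
    pvStepB (pvLevels xs) x = pvLevels (x :: xs) := by
  simp only [pvStepB, pvLevels_length]
  conv_rhs => unfold pvLevels
  simp only [List.length_cons]
  apply List.map_congr_left
  intro k hk
  rw [List.mem_range] at hk
  have hcomb := PySem.List.combinations_cons_succ x xs k
  have hlower : (if 0 < k then (pvLevels xs).getD (k - 1) [] else [(([] : List (List Int)), (0 : Int))]) =
      (PySem.List.combinations xs k).map (fun c => (c, pvSumF c)) := by
    by_cases h0 : 0 < k
    · have hk1 : k - 1 + 1 = k := by omega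
      rw [if_pos h0, pvLevels_getD xs (k-1) (by omega), hk1]
    · have : k = 0 := by omega
      subst this
      simp [PySem.List.combinations_zero, pvSumF]
  have hupper : (if k < xs.length then (pvLevels xs).getD k [] else []) =
      (PySem.List.combinations xs (k + 1)).map (fun c => (c, pvSumF c)) := by
    by_cases hkn : k < xs.length
    · rw [if_pos hkn, pvLevels_getD xs k hkn]
    · have hnil : PySem.List.combinations xs (k + 1) = [] :=
        PySem.List.combinations_eq_nil_of_length_lt xs (by omega)
      rw [if_neg hkn, hnil]
      simp
  simp only [hlower, hupper, hcomb, List.map_append, List.map_map]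
  congr 1

lemma foldl_pvStepB (xs : List (List Int)) :
    xs.reverse.foldl pvStepB [] = pvLevels xs := by
  rw [List.foldl_reverse]
  induction xs with
  | nil => simp [pvLevels]
  | cons x xs ih => simp [List.foldr_cons, ih, pvStepB_pvLevels]

-- ===== VERDICT (by name: the statement is the Claim_ definition above) =====
lemma altB (listActions : List (List Int)) (budget : Int) :
    createPFfromList_alt listActions budget =
      (List.range listActions.length).flatMap (fun k =>
        (PySem.List.combinations listActions (k + 1)).filter
          (fun c => decide (pvSumF c ≤ budget))) := by
  unfold createPFfromList_alt
  rw [foldl_pvStepB]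
  unfold pvLevels
  rw [List.flatMap_map]
  congr 1
  funext k
  simp [List.filter_map, List.map_map, Function.comp_def]

theorem createPFfromList_spec : Claim_equal_createPFfromList := by
  intro listActions budget _ _
  unfold Spec_createPFfromList createPFfromList
  rw [PySem.List.pyRange_one]
  rw [PySem.List.foldl_append_eq_flatMap]
  rw [List.flatMap_map, List.nil_append, altB]
  have hn : ((listActions.length : Int) + 1 - 1).toNat = listActions.length := by omega
  rw [hn]
  congr 1
  funext k
  have h1 : ((1 : Int) + (k : Int)).toNat = k + 1 := by omega
  rw [h1]
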